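-- pv_equiv track=rewrite | github.com/becker94/99-probl-me | 99 probleme/morning_sunshine/solution.py | morning_sunshine
-- ===== SOURCE A (Python) =====
-- from typing import List
--
-- def morning_sunshine(numbers: List[int]) -> List[int]:
--     result = []
--     max_value = float('-inf')
--
--     for num in reversed(numbers):
--         if num > max_value:
--             result.append(num)
--             max_value = num
--
--     return result[::-1]
-- ===== SOURCE B (Python) =====
-- from typing import List
--
-- def morning_sunshine(numbers: List[int]) -> List[int]:
--     stack = []
--     for num in numbers:
--         while stack and stack[-1] <= num:
--             stack.pop()
--         stack.append(num)
--     return stack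
-- ===== Notes on version B (the rewrite author's own statement) =====
-- stated objective: alternative
-- what changed: Replaced the reversed scan with a running maximum plus a final reversal by a single left-to-right monotonic-stack pass: each element pops all stack entries <= it and is pushed, and the stack itself is the answer (no reversal, no -inf sentinel).
import Mathlib
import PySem

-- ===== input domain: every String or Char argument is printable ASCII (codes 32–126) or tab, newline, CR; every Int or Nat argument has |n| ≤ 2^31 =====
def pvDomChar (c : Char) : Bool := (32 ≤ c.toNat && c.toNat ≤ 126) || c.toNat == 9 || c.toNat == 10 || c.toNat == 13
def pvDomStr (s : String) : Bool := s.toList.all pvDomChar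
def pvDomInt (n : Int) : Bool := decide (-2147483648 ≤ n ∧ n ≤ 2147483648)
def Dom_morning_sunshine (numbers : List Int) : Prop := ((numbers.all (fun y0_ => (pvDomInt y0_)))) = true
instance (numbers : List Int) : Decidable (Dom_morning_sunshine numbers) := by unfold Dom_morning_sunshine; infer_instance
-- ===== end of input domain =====

-- B replaces A's reversed scan with a running maximum (and final reversal) by a single
-- left-to-right monotonic-stack pass whose stack is the answer (alternative; not faster).

-- ===== PORT A =====
-- max_value starts at float('-inf'): modelled as Option Int, none = -inf (num > -inf always true).
def msGt (n : Int) (m : Option Int) : Bool :=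
  match m with
  | none => true
  | some v => decide (v < n)

-- the 'for num in reversed(numbers)' loop: result accumulator and max state
def msLoop : List Int → List Int → Option Int → List Int
  | [], result, _ => result
  | num :: rest, result, m =>
      if msGt num m then msLoop rest (result ++ [num]) (some num)
      else msLoop rest result m

def morning_sunshine (numbers : List Int) : List Int :=
  (msLoop numbers.reverse [] none).reverse

-- ===== PORT B =====
-- Source B's stack is a Python list appended/popped at the END; here the stack is kept with its
-- TOP AT THE HEAD (the exact reverse of the Python list), so the final 'return stack'
-- becomes '.reverse'.
-- the 'while stack and stack[-1] <= num: stack.pop()' loop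
def msPop : List Int → Int → List Int
  | [], _ => []
  | t :: rest, num => if t ≤ num then msPop rest num else t :: rest

-- the 'for num in numbers' loop; state = the stack
def msAltLoop : List Int → List Int → List Int
  | stack, [] => stack
  | stack, num :: rest => msAltLoop (num :: msPop stack num) rest

def morning_sunshine_alt (numbers : List Int) : List Int :=
  (msAltLoop [] numbers).reverse

-- ===== PRECONDITION & SPEC =====
def Spec_morning_sunshine (numbers : List Int) (out : List Int) : Prop := out = morning_sunshine_alt numbers
instance (numbers : List Int) (out : List Int) : Decidable (Spec_morning_sunshine numbers out) := by unfold Spec_morning_sunshine; infer_instance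

-- ===== CLAIM (what is proved, stated in full; the proofs are below) =====
def Claim_equal_morning_sunshine : Prop := ∀ (numbers : List Int), Dom_morning_sunshine numbers → Spec_morning_sunshine numbers (morning_sunshine numbers)

-- ===== LEMMAS AND PROOFS =====

-- proof-side characterisation: keep the head iff it exceeds every tail element
def msSpec : List Int → List Int
  | [] => []
  | head :: tail =>
      if tail.all (fun y => decide (head > y)) then head :: msSpec tail else msSpec tail

-- running maximum of the loop state after consuming l starting from m
def msMax (m : Option Int) : List Int → Option Int
  | [] => m
  | n :: l => msMax (if msGt n m then some n else m) l

theorem msLoop_acc (l : List Int) : ∀ (res : List Int) (m : Option Int),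
    msLoop l res m = res ++ msLoop l [] m := by
  induction l with
  | nil => intro res m; simp [msLoop]
  | cons n rest ih =>
      intro res m
      simp only [msLoop]
      by_cases h : msGt n m = true
      · simp only [h, if_true, List.nil_append]
        rw [ih (res ++ [n]), ih [n]]
        simp
      · simp only [h]
        exact ih res m

theorem msLoop_append_last (x : Int) (l : List Int) : ∀ (m : Option Int),
    msLoop (l ++ [x]) [] m
      = msLoop l [] m ++ (if msGt x (msMax m l) then [x] else []) := by
  induction l with
  | nil => intro m; by_cases h : msGt x m = true <;> simp [msLoop, msMax, h]
  | cons n rest ih =>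
      intro m
      simp only [List.cons_append, msLoop, msMax]
      by_cases h : msGt n m = true
      · simp only [h, if_true, List.nil_append]
        rw [msLoop_acc (rest ++ [x]) [n], msLoop_acc rest [n], ih (some n)]
        simp
      · simp only [h]
        exact ih m

theorem msGt_msMax (x : Int) (l : List Int) : ∀ (m : Option Int),
    msGt x (msMax m l) = (msGt x m && l.all (fun y => decide (x > y))) := by
  induction l with
  | nil => intro m; simp [msMax]
  | cons n rest ih =>
      intro m
      simp only [msMax]
      by_cases h : msGt n m = true
      · simp only [h, if_true, ih]
        cases m with
        | none =>
            simp [msGt]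
        | some v =>
            simp only [msGt] at h ⊢
            rw [eq_comm]
            simp only [List.all_cons]
            by_cases hx : (n : Int) < x
            · have hv : (v : Int) < x := by simp at h; omega
              simp [hx, hv]
            · simp [hx]
      · simp only [h, ih]
        cases m with
        | none => simp [msGt] at h
        | some v =>
            simp only [msGt] at h ⊢
            simp only [List.all_cons]
            by_cases hv : (v : Int) < x
            · have hn : (n : Int) < x := by simp at h hv ⊢; omega
              simp [hv, hn]
            · simp [hv]

theorem ms_eq_spec (numbers : List Int) : morning_sunshine numbers = msSpec numbers := by
  induction numbers with
  | nil => rfl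
  | cons head tail ih =>
      unfold morning_sunshine at *
      simp only [List.reverse_cons]
      rw [msLoop_append_last, msGt_msMax]
      simp only [msGt, Bool.true_and]
      by_cases h : (tail.reverse.all (fun y => decide (head > y))) = true
      · have h' : tail.all (fun y => decide (head > y)) = true := by
          simpa using h
        simp [h, h', msSpec, ih.symm]
      · have h' : ¬ (tail.all (fun y => decide (head > y)) = true) := by
          simpa using h
        simp [h, h', msSpec, ih.symm]

theorem msAltLoop_push (l : List Int) : ∀ (x : Int) (st : List Int), (∀ s ∈ st, x < s) →
    msAltLoop (x :: st) l
      = if l.all (fun y => decide (y < x)) then msAltLoop [] l ++ x :: st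
        else msAltLoop st l := by
  induction l with
  | nil => intro x st _; simp [msAltLoop]
  | cons y ys ih =>
      intro x st hst
      by_cases hyx : y < x
      · have hpop : msPop (x :: st) y = x :: st := by
          simp [msPop]; omega
        simp only [msAltLoop, hpop]
        have hcons : ∀ s ∈ x :: st, y < s := by
          intro s hs
          rcases List.mem_cons.mp hs with h | h
          · omega
          · have := hst s h; omega
        rw [ih y (x :: st) hcons]
        by_cases hall : ys.all (fun z => decide (z < y)) = true
        · have hallx : ys.all (fun z => decide (z < x)) = true := by
            simp only [List.all_eq_true, decide_eq_true_eq] at hall ⊢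
            intro z hz; have := hall z hz; omega
          simp [hall, hallx, hyx, msPop]
          rw [ih y [] (by simp)]
          simp [hall]
        · rw [ih x st hst]
          by_cases hallx : ys.all (fun z => decide (z < x)) = true
          · simp [hall, hallx, hyx, msPop]
            rw [ih y [] (by simp)]
            simp [hall]
          · have hpopst : msPop st y = st := by
              cases st with
              | nil => rfl
              | cons s ss =>
                  have := hst s (by simp)
                  simp [msPop]; omega
            simp only [hpopst]
            rw [ih y st (by intro s hs; have := hst s hs; omega)]
            simp [hall]
            have hx' : ¬ ∀ z ∈ ys, z < x := by
              simp only [List.all_eq_true, decide_eq_true_eq] at hallx; exact hallx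
            simp [hx']
      · have hpop : msPop (x :: st) y = msPop st y := by
          simp [msPop]; omega
        have hcond : ((y :: ys).all (fun z => decide (z < x))) = false := by
          simp; intro h; omega
        simp only [msAltLoop, hpop, hcond, Bool.false_eq_true, if_false]

theorem alt_eq_spec (numbers : List Int) : morning_sunshine_alt numbers = msSpec numbers := by
  induction numbers with
  | nil => rfl
  | cons x xs ih =>
      unfold morning_sunshine_alt at *
      simp only [msAltLoop, msPop]
      rw [msAltLoop_push xs x [] (by simp)]
      by_cases h : xs.all (fun y => decide (y < x)) = true
      · simp [h, msSpec, ← ih]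
      · simp [h, msSpec, ← ih]

-- ===== VERDICT (by name: the statement is the Claim_ definition above) =====
theorem morning_sunshine_spec : Claim_equal_morning_sunshine := by
  intro numbers _
  unfold Spec_morning_sunshine
  rw [ms_eq_spec, alt_eq_spec]
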